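-- pv_equiv track=rewrite | github.com/mshaikh786/aimcr-reviews | helper_functions.py | calculate_section_risk
-- ===== SOURCE A (Python) =====
-- def calculate_section_risk(artifacts):
--     """Calculate cumulative risk score for a section"""
--     if not artifacts:
--         return 0, []
--
--     num_checks = len(artifacts[0]['checks'])
--     max_scores = []
--
--     # For each check position, find the maximum score across all artifacts
--     for i in range(num_checks):
--         max_score = max(artifact['checks'][i]['score'] for artifact in artifacts)
--         max_scores.append(max_score)
--
--     total_score = sum(max_scores)
--     return total_score, max_scores
-- ===== SOURCE B (Python) =====
-- def calculate_section_risk(artifacts):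
--     """Calculate cumulative risk score for a section"""
--     if not artifacts:
--         return 0, []
--
--     num_checks = len(artifacts[0]['checks'])
--     max_scores = [artifacts[0]['checks'][i]['score'] for i in range(num_checks)]
--
--     for artifact in artifacts[1:]:
--         checks = artifact['checks']
--         for i in range(num_checks):
--             s = checks[i]['score']
--             if s > max_scores[i]:
--                 max_scores[i] = s
--
--     return sum(max_scores), max_scores
-- ===== Notes on version B (the rewrite author's own statement) =====
-- stated objective: alternative
-- what changed: Replaces A's check-major nested scan (a fresh max-generator over all artifacts for each check index, re-doing the 'checks' dict lookup per artifact per index) with a single artifact-major pass that looks up each artifact's checks once and folds them into a running max_scores vector.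
import Mathlib
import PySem

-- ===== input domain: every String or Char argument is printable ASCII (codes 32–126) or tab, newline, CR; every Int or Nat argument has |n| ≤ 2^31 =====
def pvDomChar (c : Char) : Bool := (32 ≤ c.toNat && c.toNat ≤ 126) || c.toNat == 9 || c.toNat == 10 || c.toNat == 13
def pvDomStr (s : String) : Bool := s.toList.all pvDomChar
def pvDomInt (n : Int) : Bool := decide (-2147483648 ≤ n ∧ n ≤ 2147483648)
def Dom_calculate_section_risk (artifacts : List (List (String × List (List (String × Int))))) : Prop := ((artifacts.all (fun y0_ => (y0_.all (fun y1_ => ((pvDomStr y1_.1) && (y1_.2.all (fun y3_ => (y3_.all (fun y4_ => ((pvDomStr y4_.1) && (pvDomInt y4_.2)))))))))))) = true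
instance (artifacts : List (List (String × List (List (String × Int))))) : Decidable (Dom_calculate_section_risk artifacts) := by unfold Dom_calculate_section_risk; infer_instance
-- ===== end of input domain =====

-- B replaces A's check-major nested scan (a max over all artifacts recomputed for each check
-- index, with a 'checks' lookup per artifact per index) by a single artifact-major pass that
-- looks up each artifact's checks once and folds them into a running max_scores vector.

-- shared dict-lookup helper: d[k] as Option (none = KeyError)
def csrGet {α : Type} (d : List (String × α)) (k : String) : Option α :=
  (PySem.Dict.mk d).get? k

-- artifact['checks'] (with a junk default; Pre_ guarantees the key is present)
def csrChecks (artifact : List (String × List (List (String × Int)))) : List (List (String × Int)) :=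
  (csrGet artifact "checks").getD []

-- artifact's checks[i]['score'] (junk defaults; Pre_ guarantees index and key)
def csrScore (checks : List (List (String × Int))) (i : Int) : Int :=
  (csrGet ((PySem.List.pyGet? checks i).getD []) "score").getD 0

-- ===== PORT A =====
def calculate_section_risk (artifacts : List (List (String × List (List (String × Int))))) : Int × List Int :=
  match artifacts with
  | [] => (0, [])
  | a :: _ =>
    let num_checks : Int := (csrChecks a).length
    let max_scores : List Int :=
      (PySem.List.pyRange 0 num_checks).map (fun i =>
        (PySem.List.max? (artifacts.map (fun artifact => csrScore (csrChecks artifact) i))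
          (fun y => y)).getD 0)
    let total_score := max_scores.sum
    (total_score, max_scores)

-- ===== PORT B =====
def calculate_section_risk_alt (artifacts : List (List (String × List (List (String × Int))))) : Int × List Int :=
  match artifacts with
  | [] => (0, [])
  | a :: rest =>
    let checks0 := csrChecks a
    let num_checks : Int := checks0.length
    let init : List Int := (PySem.List.pyRange 0 num_checks).map (fun i => csrScore checks0 i)
    let final : List Int := rest.foldl (fun ms artifact =>
        let checks := csrChecks artifact
        ms.mapIdx (fun i m =>
          let s := csrScore checks (i : Int)
          if s > m then s else m)) init
    (final.sum, final)

-- ===== PRECONDITION & SPEC =====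
-- Pre_ excludes exactly the inputs where the Python A raises: a missing 'checks' key (KeyError),
-- an artifact with fewer checks than the first artifact (IndexError), or a check dict without
-- a 'score' key among the first num_checks checks (KeyError).
def Pre_calculate_section_risk (artifacts : List (List (String × List (List (String × Int))))) : Prop :=
  ∀ art ∈ artifacts,
    (csrGet art "checks").isSome = true ∧
    (csrChecks (artifacts.headD [])).length ≤ (csrChecks art).length ∧
    ∀ chk ∈ (csrChecks art).take (csrChecks (artifacts.headD [])).length,
      (csrGet chk "score").isSome = true
instance (artifacts : List (List (String × List (List (String × Int))))) : Decidable (Pre_calculate_section_risk artifacts) := by unfold Pre_calculate_section_risk; infer_instance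

def pvWitness_calculate_section_risk : (List (List (String × List (List (String × Int))))) :=
  [[("checks", [[("score", 3)], [("score", -1)]])],
   [("checks", [[("score", 5)], [("score", 2)], [("level", 9)]])]]

def Spec_calculate_section_risk (artifacts : List (List (String × List (List (String × Int))))) (out : Int × List Int) : Prop := out = calculate_section_risk_alt artifacts
instance (artifacts : List (List (String × List (List (String × Int))))) (out : Int × List Int) : Decidable (Spec_calculate_section_risk artifacts out) := by unfold Spec_calculate_section_risk; infer_instance

-- ===== CLAIM (what is proved, stated in full; the proofs are below) =====
def Claim_equal_calculate_section_risk : Prop := ∀ (artifacts : List (List (String × List (List (String × Int))))), Dom_calculate_section_risk artifacts → Pre_calculate_section_risk artifacts → Spec_calculate_section_risk artifacts (calculate_section_risk artifacts)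

-- ===== LEMMAS AND PROOFS =====

-- B's fold preserves the length of max_scores
lemma csr_foldl_mapIdx_length {α : Type} (u : α → Nat → Int → Int) :
    ∀ (l : List α) (init : List Int),
      (l.foldl (fun ms art => ms.mapIdx (fun i m => u art i m)) init).length = init.length := by
  intro l
  induction l with
  | nil => intro init; rfl
  | cons a t ih =>
    intro init
    simp only [List.foldl_cons]
    rw [ih]
    exact List.length_mapIdx

-- B's fold acts pointwise: entry j of the folded vector is the per-index running fold
lemma csr_foldl_mapIdx_getElem {α : Type} (u : α → Nat → Int → Int) :
    ∀ (l : List α) (init : List Int) (j : Nat) (hj : j < init.length),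
      (l.foldl (fun ms art => ms.mapIdx (fun i m => u art i m)) init)[j]'(by
          rw [csr_foldl_mapIdx_length]; exact hj)
        = l.foldl (fun m art => u art j m) init[j] := by
  intro l
  induction l with
  | nil => intro init j hj; rfl
  | cons a t ih =>
    intro init j hj
    simp only [List.foldl_cons]
    have h1 : j < (init.mapIdx (fun i m => u a i m)).length := by
      rw [List.length_mapIdx]; exact hj
    rw [ih (init.mapIdx (fun i m => u a i m)) j h1]
    simp

-- running max as an if-fold (B's update) equals the max-fold (Python's max)
lemma csr_if_fold_eq_max_fold {α : Type} (f : α → Int) :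
    ∀ (l : List α) (x : Int),
      l.foldl (fun m art => if f art > m then f art else m) x = l.foldl (fun m art => max m (f art)) x := by
  intro l
  induction l with
  | nil => intro x; rfl
  | cons a t ih =>
    intro x
    simp only [List.foldl_cons]
    rw [ih]
    congr 1
    omega

-- ===== VERDICT (by name: the statement is the Claim_ definition above) =====
theorem calculate_section_risk_spec : Claim_equal_calculate_section_risk := by
  intro artifacts _ _
  unfold Spec_calculate_section_risk
  match artifacts with
  | [] => rfl
  | a :: rest =>
    simp only [calculate_section_risk, calculate_section_risk_alt]
    have hlist :
        (PySem.List.pyRange 0 ((csrChecks a).length : Int)).map (fun i =>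
            (PySem.List.max? ((a :: rest).map (fun artifact => csrScore (csrChecks artifact) i))
              (fun y => y)).getD 0)
          = rest.foldl (fun ms artifact =>
              ms.mapIdx (fun i m =>
                if csrScore (csrChecks artifact) (i : Int) > m then csrScore (csrChecks artifact) (i : Int) else m))
              ((PySem.List.pyRange 0 ((csrChecks a).length : Int)).map (fun i => csrScore (csrChecks a) i)) := by
      set n := (csrChecks a).length with hn
      rw [PySem.List.pyRange_zero_natCast]
      apply List.ext_getElem
      · rw [csr_foldl_mapIdx_length]
        simp
      · intro j hj1 hj2
        have hjn : j < n := by simpa using hj1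
        have hinit : j < ((List.range n).map (fun k => ((k : Nat) : Int))).length := by simpa using hjn
        have hinitmap : j < (((List.range n).map (fun k => ((k : Nat) : Int))).map (fun i => csrScore (csrChecks a) i)).length := by
          simpa using hjn
        rw [csr_foldl_mapIdx_getElem (fun artifact i m =>
              if csrScore (csrChecks artifact) (i : Int) > m then csrScore (csrChecks artifact) (i : Int) else m)
            rest _ j hinitmap]
        simp only [List.getElem_map, List.getElem_range]
        rw [List.map_cons, PySem.List.max?_id_cons, Option.getD_some]
        rw [List.foldl_map]
        rw [csr_if_fold_eq_max_fold (fun artifact => csrScore (csrChecks artifact) (j : Int))]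
    simp only [hlist]
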